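-- pv_equiv track=rewrite | github.com/janic200111/IMO | lab6/plot.py | calc_similarity_nodes
-- ===== SOURCE A (Python) =====
-- def both_in_cycle(node1, node2, cycle1, cycle2):
--     if node1 in cycle1 and node2 in cycle1:
--         return True
--     if node1 in cycle2 and node2 in cycle2:
--         return True
--     return False
--
-- def calc_similarity_nodes(solution1, solution2, n):
--     solution1 = (set(solution1[0]), set(solution1[1]))
--     solution2 = (set(solution2[0]), set(solution2[1]))
--
--     similarity = 0
--     for node1 in range(n):
--         for node2 in range(node1 + 1, n, 1):
--             if both_in_cycle(
--                 node1, node2, solution1[0], solution1[1]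
--             ) and both_in_cycle(node1, node2, solution2[0], solution2[1]):
--                 similarity += 1
--
--     return similarity
-- ===== SOURCE B (Python) =====
-- def calc_similarity_nodes(solution1, solution2, n):
--     c11 = set(solution1[0])
--     c12 = set(solution1[1])
--     c21 = set(solution2[0])
--     c22 = set(solution2[1])
--
--     cnt = {}
--     total = 0
--     for node in range(n):
--         m = (node in c11, node in c12, node in c21, node in c22)
--         for k, c in cnt.items():
--             if ((m[0] and k[0]) or (m[1] and k[1])) and ((m[2] and k[2]) or (m[3] and k[3])):
--                 total += c
--         cnt[m] = cnt.get(m, 0) + 1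
--     return total
-- ===== Notes on version B (the rewrite author's own statement) =====
-- stated objective: faster
-- what changed: Instead of testing every node pair with set-membership (O(n^2)), B makes one pass over the nodes, labels each node by its 4-tuple membership mask (cycle1/cycle2 of each solution) and adds for each node the counts of previously seen compatible masks kept in a dictionary of at most 16 entries, so the pair loop disappears.
import Mathlib
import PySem

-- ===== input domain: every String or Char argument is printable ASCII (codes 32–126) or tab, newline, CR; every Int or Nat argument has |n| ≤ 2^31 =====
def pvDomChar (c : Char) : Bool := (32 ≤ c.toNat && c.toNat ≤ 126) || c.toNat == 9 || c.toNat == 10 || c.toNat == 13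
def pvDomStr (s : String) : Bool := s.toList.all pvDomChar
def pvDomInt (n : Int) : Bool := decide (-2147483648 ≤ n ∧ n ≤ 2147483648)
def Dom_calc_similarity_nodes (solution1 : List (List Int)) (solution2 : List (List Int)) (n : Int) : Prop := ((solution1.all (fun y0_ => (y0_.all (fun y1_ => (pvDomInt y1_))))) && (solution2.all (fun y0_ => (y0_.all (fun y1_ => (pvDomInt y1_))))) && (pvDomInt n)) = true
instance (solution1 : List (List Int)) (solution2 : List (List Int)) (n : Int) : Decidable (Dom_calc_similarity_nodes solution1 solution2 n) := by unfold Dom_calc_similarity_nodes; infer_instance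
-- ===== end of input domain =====

-- B replaces A's O(n^2) pair loop by one pass over the nodes that groups them by their 4-tuple
-- cycle-membership mask in a (≤ 16 entry) dictionary; equal return value is proved on Pre_.

abbrev pvK := Bool × Bool × Bool × Bool

-- ===== PORT A =====
def pv_both_in_cycle (node1 node2 : Int) (cycle1 cycle2 : List Int) : Bool :=
  if cycle1.contains node1 && cycle1.contains node2 then true
  else if cycle2.contains node1 && cycle2.contains node2 then true
  else false

-- A's double loop over range(n) × range(node1+1, n), with the four sets as parameters
def pvAloop (c11 c12 c21 c22 : List Int) (n : Int) : Int :=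
  (PySem.List.pyRange 0 n 1).foldl (fun similarity node1 =>
    (PySem.List.pyRange (node1 + 1) n 1).foldl (fun sim node2 =>
      if pv_both_in_cycle node1 node2 c11 c12 && pv_both_in_cycle node1 node2 c21 c22
      then sim + 1 else sim) similarity) 0

def calc_similarity_nodes (solution1 : List (List Int)) (solution2 : List (List Int)) (n : Int) : Int :=
  -- solution1[0] / solution1[1] / solution2[0] / solution2[1]: IndexError (= none) excluded by Pre_
  pvAloop (PySem.Set.ofList ((PySem.List.pyGet? solution1 0).getD []))
          (PySem.Set.ofList ((PySem.List.pyGet? solution1 1).getD []))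
          (PySem.Set.ofList ((PySem.List.pyGet? solution2 0).getD []))
          (PySem.Set.ofList ((PySem.List.pyGet? solution2 1).getD [])) n

-- ===== PORT B =====
-- m = (node in c11, node in c12, node in c21, node in c22)
def pv_mask (c11 c12 c21 c22 : List Int) (node : Int) : pvK :=
  (PySem.Set.contains c11 node, PySem.Set.contains c12 node,
   PySem.Set.contains c21 node, PySem.Set.contains c22 node)

-- ((m[0] and k[0]) or (m[1] and k[1])) and ((m[2] and k[2]) or (m[3] and k[3]))
def pv_compat (k m : pvK) : Bool :=
  ((m.1 && k.1) || (m.2.1 && k.2.1)) && ((m.2.2.1 && k.2.2.1) || (m.2.2.2 && k.2.2.2))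

-- B's single pass: state = (total, dict mask ↦ how many earlier nodes carry that mask)
def pvBloop (c11 c12 c21 c22 : List Int) (n : Int) : Int × PySem.Dict pvK Int :=
  (PySem.List.pyRange 0 n 1).foldl (fun s node =>
    let m := pv_mask c11 c12 c21 c22 node
    let total := s.2.items.foldl (fun t p => if pv_compat p.1 m then t + p.2 else t) s.1
    (total, s.2.insert m (s.2.getD m 0 + 1))) (0, PySem.Dict.empty)

def calc_similarity_nodes_alt (solution1 : List (List Int)) (solution2 : List (List Int)) (n : Int) : Int :=
  (pvBloop (PySem.Set.ofList ((PySem.List.pyGet? solution1 0).getD []))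
           (PySem.Set.ofList ((PySem.List.pyGet? solution1 1).getD []))
           (PySem.Set.ofList ((PySem.List.pyGet? solution2 0).getD []))
           (PySem.Set.ofList ((PySem.List.pyGet? solution2 1).getD [])) n).1

-- ===== PRECONDITION & SPEC =====
-- Pre_ excludes exactly the inputs where the Python A raises IndexError
-- (solution1[0]/solution1[1]/solution2[0]/solution2[1] on a list of fewer than 2 cycles).
def Pre_calc_similarity_nodes (solution1 : List (List Int)) (solution2 : List (List Int)) (n : Int) : Prop :=
  2 ≤ solution1.length ∧ 2 ≤ solution2.length
instance (solution1 : List (List Int)) (solution2 : List (List Int)) (n : Int) : Decidable (Pre_calc_similarity_nodes solution1 solution2 n) := by unfold Pre_calc_similarity_nodes; infer_instance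

def pvWitness_calc_similarity_nodes : List (List Int) × List (List Int) × Int :=
  ([[0, 1], [2]], [[0, 2], [1]], 3)

def Spec_calc_similarity_nodes (solution1 : List (List Int)) (solution2 : List (List Int)) (n : Int) (out : Int) : Prop := out = calc_similarity_nodes_alt solution1 solution2 n
instance (solution1 : List (List Int)) (solution2 : List (List Int)) (n : Int) (out : Int) : Decidable (Spec_calc_similarity_nodes solution1 solution2 n out) := by unfold Spec_calc_similarity_nodes; infer_instance

-- ===== CLAIM (what is proved, stated in full; the proofs are below) =====
def Claim_equal_calc_similarity_nodes : Prop := ∀ (solution1 : List (List Int)) (solution2 : List (List Int)) (n : Int), Dom_calc_similarity_nodes solution1 solution2 n → Pre_calc_similarity_nodes solution1 solution2 n → Spec_calc_similarity_nodes solution1 solution2 n (calc_similarity_nodes solution1 solution2 n)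

-- ===== LEMMAS AND PROOFS =====

-- sum of per-key multiplicities over any nodup covering list = countP
lemma pv_sum_count {K : Type} [BEq K] [LawfulBEq K] (P : K → Bool) (ms : List K) :
    ∀ (S : List K), S.Nodup → (∀ x ∈ ms, x ∈ S) →
      (((S.filter P).map (fun k => (ms.count k : Int))).sum = (ms.countP P : Int)) := by
  induction ms with
  | nil => intro S _ _; simp
  | cons x ms ih =>
    intro S hS hmem
    have h1 : (S.filter P).map (fun k => ((x :: ms).count k : Int))
        = (S.filter P).map (fun k => (ms.count k : Int) + (if k == x then (1:Int) else 0)) := by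
      refine List.map_congr_left (fun k _ => ?_)
      rw [List.count_cons]
      push_cast
      cases hb : k == x
      · simp
        exact fun he => (ne_of_beq_false hb) he.symm
      · simp
        exact (eq_of_beq hb).symm
    have hcnt2 : (S.filter P).count x = if P x then 1 else 0 := by
      by_cases h : P x
      · rw [List.count_filter h]
        simp [h, List.count_eq_one_of_mem hS (hmem x (by simp))]
      · rw [if_neg h, List.count_eq_zero]
        simp [List.mem_filter, h]
    have h2 : ((S.filter P).map (fun k => if k == x then (1:Int) else 0)).sum
        = if P x then (1:Int) else 0 := by
      rw [PySem.List.sum_map_ite_one_zero]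
      have hcnt : (S.filter P).countP (fun k => k == x) = (S.filter P).count x := by
        simp [List.count]
      rw [hcnt, hcnt2]
      by_cases h : P x <;> simp [h]
    rw [h1, PySem.List.sum_map_add_int, h2,
        ih S hS (fun y hy => hmem y (by simp [hy])), List.countP_cons]
    by_cases h : P x <;> simp [h]

-- B's inner loop over the counter's items adds exactly the number of compatible earlier masks
lemma pv_item_sum (ms : List pvK) (P : pvK → Bool) (init : Int) :
    (PySem.Dict.counter ms).items.foldl (fun t p => if P p.1 then t + p.2 else t) init
      = init + (ms.countP P : Int) := by
  rw [PySem.Dict.items_counter, PySem.List.foldl_if_eq_foldl_filter, List.filter_map,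
      PySem.List.foldl_add (g := fun p : pvK × Int => p.2), List.map_map]
  have h := pv_sum_count P ms (PySem.Set.ofList ms) (PySem.Set.nodup_ofList ms)
    (fun x hx => (PySem.Set.mem_ofList ms x).2 hx)
  have hc : ((fun p : pvK × Int => P p.1) ∘ fun k => (k, (ms.count k : Int))) = P := rfl
  have hs : ((fun p : pvK × Int => p.2) ∘ fun k : pvK => (k, (ms.count k : Int)))
      = fun k : pvK => (ms.count k : Int) := rfl
  rw [hc, hs]
  exact congrArg (fun z => init + z) h

-- A's pair test, abbreviated
def pvCA (c11 c12 c21 c22 : List Int) (i j : Int) : Bool :=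
  pv_both_in_cycle i j c11 c12 && pv_both_in_cycle i j c21 c22

-- A's nested loop as a sum of inner counts
lemma pvA_sum (c11 c12 c21 c22 : List Int) (n : Int) :
    pvAloop c11 c12 c21 c22 n
      = ((PySem.List.pyRange 0 n 1).map (fun i =>
          (((PySem.List.pyRange (i + 1) n 1).countP (pvCA c11 c12 c21 c22 i)) : Int))).sum := by
  unfold pvAloop
  have h : ∀ (acc i : Int),
      (PySem.List.pyRange (i + 1) n 1).foldl (fun sim node2 =>
        if pv_both_in_cycle i node2 c11 c12 && pv_both_in_cycle i node2 c21 c22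
        then sim + 1 else sim) acc
      = acc + (((PySem.List.pyRange (i + 1) n 1).countP (pvCA c11 c12 c21 c22 i)) : Int) := by
    intro acc i
    rw [PySem.List.foldl_if_add_one]
    rfl
  calc (PySem.List.pyRange 0 n 1).foldl (fun similarity node1 =>
        (PySem.List.pyRange (node1 + 1) n 1).foldl (fun sim node2 =>
          if pv_both_in_cycle node1 node2 c11 c12 && pv_both_in_cycle node1 node2 c21 c22
          then sim + 1 else sim) similarity) 0
      = (PySem.List.pyRange 0 n 1).foldl (fun acc i =>
          acc + (((PySem.List.pyRange (i + 1) n 1).countP (pvCA c11 c12 c21 c22 i)) : Int)) 0 := by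
        apply PySem.List.foldl_congr_mem
        intro acc i _
        exact h acc i
    _ = _ := by rw [PySem.List.foldl_add]; simp

-- extending A's bound by one node adds the pairs (i, t), i < t
lemma pvA_succ (c11 c12 c21 c22 : List Int) (t : Nat) :
    pvAloop c11 c12 c21 c22 ((t : Int) + 1)
      = pvAloop c11 c12 c21 c22 (t : Int)
        + (((PySem.List.pyRange 0 (t : Int) 1).countP (fun i => pvCA c11 c12 c21 c22 i (t : Int))) : Int) := by
  rw [pvA_sum, pvA_sum]
  rw [PySem.List.pyRange_one_succ_right (by exact_mod_cast Nat.zero_le t)]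
  rw [List.map_append, List.sum_append]
  have hmap : (PySem.List.pyRange 0 (t : Int) 1).map (fun i =>
        (((PySem.List.pyRange (i + 1) ((t : Int) + 1) 1).countP (pvCA c11 c12 c21 c22 i)) : Int))
      = (PySem.List.pyRange 0 (t : Int) 1).map (fun i =>
        (((PySem.List.pyRange (i + 1) (t : Int) 1).countP (pvCA c11 c12 c21 c22 i)) : Int)
        + (if pvCA c11 c12 c21 c22 i (t : Int) then (1:Int) else 0)) := by
    refine List.map_congr_left (fun i hi => ?_)
    have hit : i < (t : Int) := ((PySem.List.mem_pyRange_one).1 hi).2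
    rw [PySem.List.pyRange_one_succ_right (by omega), List.countP_append]
    push_cast
    by_cases h : pvCA c11 c12 c21 c22 i (t : Int) <;> simp [h]
  rw [hmap, PySem.List.sum_map_add_int, PySem.List.sum_map_ite_one_zero]
  simp

-- the mask-pair test of B coincides with A's pair test
lemma pv_compat_mask (c11 c12 c21 c22 : List Int) (i j : Int) :
    pv_compat (pv_mask c11 c12 c21 c22 i) (pv_mask c11 c12 c21 c22 j)
      = pvCA c11 c12 c21 c22 i j := by
  simp only [pv_compat, pv_mask, pvCA, pv_both_in_cycle, PySem.Set.contains]
  cases c11.contains i <;> cases c11.contains j <;> cases c12.contains i <;> cases c12.contains j <;>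
    cases c21.contains i <;> cases c21.contains j <;> cases c22.contains i <;> cases c22.contains j <;> rfl

-- B's dictionary update is exactly the counter of one more mask
lemma pv_counter_snoc (ms : List pvK) (m : pvK) :
    (PySem.Dict.counter ms).insert m ((PySem.Dict.counter ms).getD m 0 + 1)
      = PySem.Dict.counter (ms ++ [m]) := by
  rw [← PySem.Dict.foldl_insert_getD_add_one_eq_counter, ← PySem.Dict.foldl_insert_getD_add_one_eq_counter,
      List.foldl_append, List.foldl_cons, List.foldl_nil]

-- main loop invariant: B's state after range(t) is (A's value for n = t, the counter of the masks)
lemma pvB_invariant (c11 c12 c21 c22 : List Int) (t : Nat) :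
    pvBloop c11 c12 c21 c22 (t : Int)
      = (pvAloop c11 c12 c21 c22 (t : Int),
         PySem.Dict.counter ((PySem.List.pyRange 0 (t : Int) 1).map (pv_mask c11 c12 c21 c22))) := by
  induction t with
  | zero =>
    simp [pvBloop, pvAloop]
    rfl
  | succ t ih =>
    have hcast : ((t + 1 : Nat) : Int) = (t : Int) + 1 := by push_cast; ring
    rw [hcast]
    unfold pvBloop at ih ⊢
    rw [PySem.List.pyRange_one_succ_right (by exact_mod_cast Nat.zero_le t), List.foldl_append, ih,
        List.foldl_cons, List.foldl_nil]
    have h1 : (PySem.Dict.counter ((PySem.List.pyRange 0 (t:Int) 1).map (pv_mask c11 c12 c21 c22))).items.foldl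
        (fun a p => if pv_compat p.1 (pv_mask c11 c12 c21 c22 (t:Int)) then a + p.2 else a)
        (pvAloop c11 c12 c21 c22 (t:Int))
        = pvAloop c11 c12 c21 c22 ((t:Int) + 1) := by
      have hsum := pv_item_sum ((PySem.List.pyRange 0 (t:Int) 1).map (pv_mask c11 c12 c21 c22))
        (fun k => pv_compat k (pv_mask c11 c12 c21 c22 (t:Int))) (pvAloop c11 c12 c21 c22 (t:Int))
      refine hsum.trans ?_
      rw [List.countP_map, pvA_succ]
      have hco : ((fun k => pv_compat k (pv_mask c11 c12 c21 c22 (t:Int))) ∘ pv_mask c11 c12 c21 c22)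
          = fun i => pvCA c11 c12 c21 c22 i (t:Int) := by
        funext i; exact pv_compat_mask c11 c12 c21 c22 i (t:Int)
      rw [hco]
    rw [List.map_append, List.map_cons, List.map_nil, ← pv_counter_snoc]
    exact Prod.ext (by exact h1) rfl

lemma pv_loops_eq (c11 c12 c21 c22 : List Int) (n : Int) :
    pvAloop c11 c12 c21 c22 n = (pvBloop c11 c12 c21 c22 n).1 := by
  by_cases hn : 0 ≤ n
  · obtain ⟨t, rfl⟩ : ∃ t : Nat, (t : Int) = n := ⟨n.toNat, Int.toNat_of_nonneg hn⟩
    rw [pvB_invariant]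
  · have he : PySem.List.pyRange 0 n 1 = [] := by
      rw [PySem.List.pyRange_one]
      simp
      omega
    unfold pvAloop pvBloop
    rw [he]
    rfl

-- ===== VERDICT (by name: the statement is the Claim_ definition above) =====
theorem calc_similarity_nodes_spec : Claim_equal_calc_similarity_nodes := by
  intro s1 s2 n _ _
  unfold Spec_calc_similarity_nodes calc_similarity_nodes calc_similarity_nodes_alt
  exact pv_loops_eq _ _ _ _ n
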